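-- pv_equiv track=rewrite | github.com/morefreeze/morefreeze.github.io | code/word_search.py | _has_shared_cell
-- ===== SOURCE A (Python) =====
-- DIRECTIONS = {
--     'E':  (0, 1),   # East (horizontal →)
--     'W':  (0, -1),  # West (horizontal ←)
--     'S':  (1, 0),   # South (vertical ↓)
--     'N':  (-1, 0),  # North (vertical ↑)
--     'SE': (1, 1),   # Diagonal ↘
--     'SW': (1, -1),  # Diagonal ↙
--     'NE': (-1, 1),  # Diagonal ↗
--     'NW': (-1, -1), # Diagonal ↖
-- }
--
-- def _has_shared_cell(words, rows, cols, placement):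
--     from collections import defaultdict
--     cell_letters = defaultdict(set)
--     for word, sr, sc, dir_name in placement:
--         dr, dc = DIRECTIONS[dir_name]
--         for k, ch in enumerate(word):
--             cell_letters[(sr + dr * k, sc + dc * k)].add((word, ch))
--     # Shared cell = same (row,col) appears in options from different words
--     for pos, entries in cell_letters.items():
--         if len({w for w, _ in entries}) > 1:
--             return True
--     return False
-- ===== SOURCE B (Python) =====
-- DIRECTIONS = {
--     'E':  (0, 1),
--     'W':  (0, -1),
--     'S':  (1, 0),
--     'N':  (-1, 0),
--     'SE': (1, 1),
--     'SW': (1, -1),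
--     'NE': (-1, 1),
--     'NW': (-1, -1),
-- }
--
-- def _has_shared_cell(words, rows, cols, placement):
--     # Single early-exit pass: occupant maps each cell to the word covering it.
--     occupant = {}
--     for word, sr, sc, dir_name in placement:
--         dr, dc = DIRECTIONS[dir_name]
--         for k in range(len(word)):
--             cell = (sr + dr * k, sc + dc * k)
--             prev = occupant.get(cell)
--             if prev is None:
--                 occupant[cell] = word
--             elif prev != word:
--                 return True
--     return False
-- ===== Notes on version B (the rewrite author's own statement) =====
-- stated objective: simpler
-- what changed: Replaces the build-a-dict-of-(word,letter)-sets pass followed by a distinct-word-count scan with a single early-exit pass keeping one occupant word per cell and returning True the moment a cell is hit by a different word.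
import Mathlib
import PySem

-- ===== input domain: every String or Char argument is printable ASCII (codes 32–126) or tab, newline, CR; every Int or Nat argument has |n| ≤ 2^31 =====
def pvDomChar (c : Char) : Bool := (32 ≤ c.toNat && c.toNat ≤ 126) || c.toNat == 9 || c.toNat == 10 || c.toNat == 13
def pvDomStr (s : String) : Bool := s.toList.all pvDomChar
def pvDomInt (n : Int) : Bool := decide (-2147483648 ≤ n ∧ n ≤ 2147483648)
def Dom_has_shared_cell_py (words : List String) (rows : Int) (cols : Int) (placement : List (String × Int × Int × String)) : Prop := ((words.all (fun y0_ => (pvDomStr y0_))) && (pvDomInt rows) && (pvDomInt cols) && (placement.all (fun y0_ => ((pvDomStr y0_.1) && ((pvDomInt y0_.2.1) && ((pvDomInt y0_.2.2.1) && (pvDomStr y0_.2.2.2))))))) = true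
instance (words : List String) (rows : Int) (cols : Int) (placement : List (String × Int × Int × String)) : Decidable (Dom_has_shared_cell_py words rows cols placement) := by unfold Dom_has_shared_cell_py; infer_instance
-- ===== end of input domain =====

-- B replaces A's build-a-dict-of-(word,letter)-sets pass plus distinct-word-count scan by one
-- early-exit pass keeping a single occupant word per cell (simpler; return value only, no mutation).

-- ===== PORT A =====
-- module-level DIRECTIONS dict
def pvDirections : PySem.Dict String (Int × Int) :=
  PySem.Dict.ofList [("E", (0, 1)), ("W", (0, -1)), ("S", (1, 0)), ("N", (-1, 0)),
                     ("SE", (1, 1)), ("SW", (1, -1)), ("NE", (-1, 1)), ("NW", (-1, -1))]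

-- DIRECTIONS[dir_name]: KeyError on a missing key is excluded by Pre_; ported with default (0,0)
def pvDirOf (dir_name : String) : Int × Int := (pvDirections.get? dir_name).getD (0, 0)

def has_shared_cell_py (words : List String) (rows : Int) (cols : Int) (placement : List (String × Int × Int × String)) : Bool :=
  let cell_letters : PySem.Dict (Int × Int) (PySem.Set (String × Char)) :=
    placement.foldl (fun d e =>
      let dd := pvDirOf e.2.2.2
      (PySem.List.enumerate e.1.toList 0).foldl
        (fun d kc => d.modify (e.2.1 + dd.1 * kc.1, e.2.2.1 + dd.2 * kc.1) PySem.Set.empty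
          (fun s => PySem.Set.add s (e.1, kc.2))) d)
      PySem.Dict.empty
  cell_letters.items.any (fun pe => decide (1 < PySem.Set.len (PySem.Set.ofList (pe.2.map Prod.fst))))

-- ===== PORT B =====
-- inner 'for k in range(len(word))' loop; none = early 'return True'
def pvAltWord (word : String) (sr sc dr dc : Int) (ks : List Int)
    (occ : PySem.Dict (Int × Int) String) : Option (PySem.Dict (Int × Int) String) :=
  match ks with
  | [] => some occ
  | k :: ks =>
    let cell := (sr + dr * k, sc + dc * k)
    match occ.get? cell with
    | none => pvAltWord word sr sc dr dc ks (occ.insert cell word)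
    | some prev => if prev ≠ word then none else pvAltWord word sr sc dr dc ks occ

-- outer loop over the placements
def pvAltGo (placement : List (String × Int × Int × String))
    (occ : PySem.Dict (Int × Int) String) : Bool :=
  match placement with
  | [] => false
  | e :: rest =>
    let dd := pvDirOf e.2.2.2
    match pvAltWord e.1 e.2.1 e.2.2.1 dd.1 dd.2 (PySem.List.pyRange 0 (PySem.Str.len e.1) 1) occ with
    | none => true
    | some occ' => pvAltGo rest occ'

def has_shared_cell_py_alt (words : List String) (rows : Int) (cols : Int) (placement : List (String × Int × Int × String)) : Bool :=
  pvAltGo placement PySem.Dict.empty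

-- ===== PRECONDITION & SPEC =====
-- Pre_ excludes only placements naming a direction outside DIRECTIONS, on which Python A raises KeyError.
def Pre_has_shared_cell_py (words : List String) (rows : Int) (cols : Int) (placement : List (String × Int × Int × String)) : Prop :=
  ∀ e ∈ placement, e.2.2.2 ∈ ["E", "W", "S", "N", "SE", "SW", "NE", "NW"]
instance (words : List String) (rows : Int) (cols : Int) (placement : List (String × Int × Int × String)) : Decidable (Pre_has_shared_cell_py words rows cols placement) := by unfold Pre_has_shared_cell_py; infer_instance

def pvWitness_has_shared_cell_py : List String × Int × Int × (List (String × Int × Int × String)) :=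
  (["ab"], 3, 3, [("ab", 0, 0, "E"), ("bc", 1, 0, "N")])

def Spec_has_shared_cell_py (words : List String) (rows : Int) (cols : Int) (placement : List (String × Int × Int × String)) (out : Bool) : Prop := out = has_shared_cell_py_alt words rows cols placement
instance (words : List String) (rows : Int) (cols : Int) (placement : List (String × Int × Int × String)) (out : Bool) : Decidable (Spec_has_shared_cell_py words rows cols placement out) := by unfold Spec_has_shared_cell_py; infer_instance

-- ===== CLAIM (what is proved, stated in full; the proofs are below) =====
def Claim_equal_has_shared_cell_py : Prop := ∀ (words : List String) (rows : Int) (cols : Int) (placement : List (String × Int × Int × String)), Dom_has_shared_cell_py words rows cols placement → Pre_has_shared_cell_py words rows cols placement → Spec_has_shared_cell_py words rows cols placement (has_shared_cell_py words rows cols placement)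

-- ===== LEMMAS AND PROOFS =====

-- cell of entry e at (integer) offset k, and the coverage relation both programs share
def pvCellAt (e : String × Int × Int × String) (k : Int) : Int × Int :=
  (e.2.1 + (pvDirOf e.2.2.2).1 * k, e.2.2.1 + (pvDirOf e.2.2.2).2 * k)

def pvCovers (e : String × Int × Int × String) (c : Int × Int) : Prop :=
  ∃ k : Int, 0 ≤ k ∧ k < (e.1.toList.length : Int) ∧ c = pvCellAt e k

def pvConflict (L : List (String × Int × Int × String)) : Prop :=
  ∃ e1 ∈ L, ∃ e2 ∈ L, e1.1 ≠ e2.1 ∧ ∃ c, pvCovers e1 c ∧ pvCovers e2 c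

-- ----- A side -----

-- the body of A's outer building loop, named for the proofs (definitionally the port's lambda)
def pvStepA (d : PySem.Dict (Int × Int) (PySem.Set (String × Char))) (e : String × Int × Int × String) :
    PySem.Dict (Int × Int) (PySem.Set (String × Char)) :=
  (PySem.List.enumerate e.1.toList 0).foldl
    (fun d kc => d.modify (pvCellAt e kc.1) PySem.Set.empty (fun s => PySem.Set.add s (e.1, kc.2))) d

theorem pv_memA_inner (e : String × Int × Int × String) :
    ∀ (l : List (Int × Char)) (d : PySem.Dict (Int × Int) (PySem.Set (String × Char)))
      (c : Int × Int) (p : String × Char),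
      (p ∈ (l.foldl (fun d kc => d.modify (pvCellAt e kc.1) PySem.Set.empty
            (fun s => PySem.Set.add s (e.1, kc.2))) d).getD c PySem.Set.empty ↔
        p ∈ d.getD c PySem.Set.empty ∨ ∃ kc ∈ l, c = pvCellAt e kc.1 ∧ p = (e.1, kc.2)) := by
  intro l
  induction l with
  | nil => intro d c p; simp
  | cons kc0 l ih =>
    intro d c p
    rw [List.foldl_cons, ih, PySem.Dict.getD_modify, List.exists_mem_cons_iff]
    by_cases hc : c = pvCellAt e kc0.1
    · subst hc
      rw [if_pos rfl, PySem.Set.mem_add]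
      tauto
    · rw [if_neg hc]
      tauto

theorem pv_memA :
    ∀ (L : List (String × Int × Int × String)) (d : PySem.Dict (Int × Int) (PySem.Set (String × Char)))
      (c : Int × Int) (p : String × Char),
      (p ∈ (L.foldl pvStepA d).getD c PySem.Set.empty ↔
        p ∈ d.getD c PySem.Set.empty ∨
          ∃ e ∈ L, ∃ kc ∈ PySem.List.enumerate e.1.toList 0, c = pvCellAt e kc.1 ∧ p = (e.1, kc.2)) := by
  intro L
  induction L with
  | nil => intro d c p; simp
  | cons e L ih =>
    intro d c p
    rw [List.foldl_cons, ih, List.exists_mem_cons_iff]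
    have h2 := pv_memA_inner e (PySem.List.enumerate e.1.toList 0) d c p
    rw [show pvStepA d e = (PySem.List.enumerate e.1.toList 0).foldl
      (fun d kc => d.modify (pvCellAt e kc.1) PySem.Set.empty
        (fun s => PySem.Set.add s (e.1, kc.2))) d from rfl, h2]
    exact or_assoc

theorem pv_nodupA :
    ∀ (L : List (String × Int × Int × String)) (d : PySem.Dict (Int × Int) (PySem.Set (String × Char))),
      d.keys.Nodup → (L.foldl pvStepA d).keys.Nodup := by
  intro L
  induction L with
  | nil => intro d h; exact h
  | cons e L ih =>
    intro d h
    rw [List.foldl_cons]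
    refine ih _ ?_
    show (List.foldl (fun d kc => d.modify (pvCellAt e kc.1) PySem.Set.empty
      (fun s => PySem.Set.add s (e.1, kc.2))) d (PySem.List.enumerate e.1.toList 0)).keys.Nodup
    exact PySem.Dict.nodup_keys_foldl_modify_key (PySem.List.enumerate e.1.toList 0)
      (fun kc => pvCellAt e kc.1) PySem.Set.empty
      (fun _ kc s => PySem.Set.add s (e.1, kc.2)) d h

theorem pv_one_lt_len {α : Type} [BEq α] [LawfulBEq α] (l : List α) :
    1 < PySem.Set.len (PySem.Set.ofList l) ↔ ∃ a ∈ l, ∃ b ∈ l, a ≠ b := by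
  constructor
  · intro h
    rcases hm : PySem.Set.ofList l with _ | ⟨a, _ | ⟨b, t⟩⟩
    · rw [hm] at h; simp [PySem.Set.len] at h
    · rw [hm] at h; simp [PySem.Set.len] at h
    · have hnd := PySem.Set.nodup_ofList l
      rw [hm] at hnd
      have hab : a ≠ b := by
        intro hab
        exact (List.nodup_cons.1 hnd).1 (hab ▸ List.mem_cons_self)
      have ha : a ∈ l := (PySem.Set.mem_ofList l a).1 (by rw [hm]; exact List.mem_cons_self)
      have hb : b ∈ l := (PySem.Set.mem_ofList l b).1
        (by rw [hm]; exact List.mem_cons_of_mem _ List.mem_cons_self)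
      exact ⟨a, ha, b, hb, hab⟩
  · rintro ⟨a, ha, b, hb, hab⟩
    have ha' : a ∈ PySem.Set.ofList l := (PySem.Set.mem_ofList l a).2 ha
    have hb' : b ∈ PySem.Set.ofList l := (PySem.Set.mem_ofList l b).2 hb
    rcases hm : PySem.Set.ofList l with _ | ⟨x, _ | ⟨y, t⟩⟩
    · rw [hm] at ha'; simp at ha'
    · rw [hm] at ha' hb'
      simp at ha' hb'
      exact absurd (ha'.trans hb'.symm) hab
    · simp [PySem.Set.len]

theorem pv_covers_of_kc (e : String × Int × Int × String) (c : Int × Int)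
    (kc : Int × Char) (hkc : kc ∈ PySem.List.enumerate e.1.toList 0)
    (hc : c = pvCellAt e kc.1) : pvCovers e c := by
  rcases (PySem.List.mem_enumerate_iff _ _ _).1 hkc with ⟨k, hk, rfl⟩
  exact ⟨(k : Int), by positivity, by exact_mod_cast hk, by simpa using hc⟩

theorem pv_kc_of_covers (e : String × Int × Int × String) (c : Int × Int)
    (h : pvCovers e c) :
    ∃ kc ∈ PySem.List.enumerate e.1.toList 0, c = pvCellAt e kc.1 := by
  rcases h with ⟨k, h0, hl, rfl⟩
  have hkn : k.toNat < e.1.toList.length := by omega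
  refine ⟨(0 + (k.toNat : Int), e.1.toList[k.toNat]),
    (PySem.List.mem_enumerate_iff _ _ _).2 ⟨k.toNat, hkn, rfl⟩, ?_⟩
  simp only []
  congr 1
  omega

theorem pv_A_iff (words : List String) (rows cols : Int) (L : List (String × Int × Int × String)) :
    has_shared_cell_py words rows cols L = true ↔ pvConflict L := by
  rw [show has_shared_cell_py words rows cols L = (L.foldl pvStepA PySem.Dict.empty).items.any
    (fun pe => decide (1 < PySem.Set.len (PySem.Set.ofList (pe.2.map Prod.fst)))) from rfl]
  have hnd : (L.foldl pvStepA PySem.Dict.empty).keys.Nodup :=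
    pv_nodupA L _ PySem.Dict.nodup_keys_empty
  rw [PySem.Dict.items_eq_map_keys _ hnd PySem.Set.empty, List.any_eq_true]
  constructor
  · rintro ⟨pe, hpe, hpred⟩
    rcases List.mem_map.1 hpe with ⟨c, _, rfl⟩
    rcases (pv_one_lt_len _).1 (of_decide_eq_true hpred) with ⟨a, ha, b, hb, hab⟩
    rcases List.mem_map.1 ha with ⟨p, hp, rfl⟩
    rcases List.mem_map.1 hb with ⟨q, hq, rfl⟩
    rcases (pv_memA L _ c p).1 hp with hp0 | ⟨e1, he1, kc1, hkc1, hc1, hp1⟩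
    · simp [PySem.Set.empty] at hp0
    rcases (pv_memA L _ c q).1 hq with hq0 | ⟨e2, he2, kc2, hkc2, hc2, hq1⟩
    · simp [PySem.Set.empty] at hq0
    refine ⟨e1, he1, e2, he2, ?_, c, pv_covers_of_kc e1 c kc1 hkc1 hc1,
      pv_covers_of_kc e2 c kc2 hkc2 hc2⟩
    rw [hp1] at hab
    rw [hq1] at hab
    simpa using hab
  · rintro ⟨e1, he1, e2, he2, hne, c, hc1, hc2⟩
    rcases pv_kc_of_covers e1 c hc1 with ⟨kc1, hkc1, hcc1⟩
    rcases pv_kc_of_covers e2 c hc2 with ⟨kc2, hkc2, hcc2⟩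
    have hp : (e1.1, kc1.2) ∈ (L.foldl pvStepA PySem.Dict.empty).getD c PySem.Set.empty :=
      (pv_memA L _ c _).2 (Or.inr ⟨e1, he1, kc1, hkc1, hcc1, rfl⟩)
    have hq : (e2.1, kc2.2) ∈ (L.foldl pvStepA PySem.Dict.empty).getD c PySem.Set.empty :=
      (pv_memA L _ c _).2 (Or.inr ⟨e2, he2, kc2, hkc2, hcc2, rfl⟩)
    have hck : c ∈ (L.foldl pvStepA PySem.Dict.empty).keys := by
      by_contra hck
      have hnone := (PySem.Dict.get?_eq_none_iff_not_mem_keys _ c).2 hck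
      rw [PySem.Dict.getD_eq_get?_getD, hnone] at hp
      simp [PySem.Set.empty] at hp
    refine ⟨(c, (L.foldl pvStepA PySem.Dict.empty).getD c PySem.Set.empty),
      List.mem_map.2 ⟨c, hck, rfl⟩, decide_eq_true ((pv_one_lt_len _).2
        ⟨e1.1, List.mem_map.2 ⟨_, hp, rfl⟩, e2.1, List.mem_map.2 ⟨_, hq, rfl⟩, hne⟩)⟩


-- ----- B side -----

theorem pv_altWord_get? (word : String) (sr sc dr dc : Int) :
    ∀ (ks : List Int) (occ occ' : PySem.Dict (Int × Int) String),
      pvAltWord word sr sc dr dc ks occ = some occ' →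
      ∀ c, occ'.get? c = occ.get? c ∨
        (occ.get? c = none ∧ occ'.get? c = some word ∧ ∃ k ∈ ks, c = (sr + dr * k, sc + dc * k)) := by
  intro ks
  induction ks with
  | nil => intro occ occ' h c; simp [pvAltWord] at h; subst h; left; rfl
  | cons k ks ih =>
    intro occ occ' h c
    simp only [pvAltWord] at h
    rcases hg : occ.get? (sr + dr * k, sc + dc * k) with _ | prev
    · rw [hg] at h
      rcases ih _ _ h c with h1 | ⟨h1, h2, k', hk', hc⟩
      · rw [PySem.Dict.get?_insert] at h1
        by_cases hc : c = (sr + dr * k, sc + dc * k)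
        · right
          refine ⟨by rw [hc]; exact hg, by rw [h1]; simp [hc], k, by simp, hc⟩
        · left; rwa [if_neg hc] at h1
      · rw [PySem.Dict.get?_insert] at h1
        by_cases hc2 : c = (sr + dr * k, sc + dc * k)
        · simp [hc2] at h1
        · rw [if_neg hc2] at h1
          exact Or.inr ⟨h1, h2, k', List.mem_cons_of_mem _ hk', hc⟩
    · rw [hg] at h
      by_cases hpw : prev = word
      · simp [hpw] at h
        rcases ih _ _ h c with h1 | ⟨h1, h2, k', hk', hc⟩
        · exact Or.inl h1
        · exact Or.inr ⟨h1, h2, k', List.mem_cons_of_mem _ hk', hc⟩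
      · simp [hpw] at h

theorem pv_altWord_mono (word : String) (sr sc dr dc : Int) (ks : List Int)
    (occ occ' : PySem.Dict (Int × Int) String)
    (h : pvAltWord word sr sc dr dc ks occ = some occ')
    (c : Int × Int) (w : String) (hw : occ.get? c = some w) : occ'.get? c = some w := by
  rcases pv_altWord_get? word sr sc dr dc ks occ occ' h c with h1 | ⟨h1, _, _⟩
  · rw [h1, hw]
  · rw [h1] at hw; exact absurd hw (by simp)

theorem pv_altWord_covered (word : String) (sr sc dr dc : Int) :
    ∀ (ks : List Int) (occ occ' : PySem.Dict (Int × Int) String),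
      pvAltWord word sr sc dr dc ks occ = some occ' →
      ∀ k ∈ ks, occ'.get? (sr + dr * k, sc + dc * k) = some word := by
  intro ks
  induction ks with
  | nil => intro occ occ' h k hk; simp at hk
  | cons k0 ks ih =>
    intro occ occ' h k hk
    simp only [pvAltWord] at h
    rcases hg : occ.get? (sr + dr * k0, sc + dc * k0) with _ | prev
    · rw [hg] at h
      rcases List.mem_cons.1 hk with rfl | hk'
      · exact pv_altWord_mono word sr sc dr dc ks _ _ h _ _ (PySem.Dict.get?_insert_self _ _ _)
      · exact ih _ _ h _ hk'
    · rw [hg] at h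
      by_cases hpw : prev = word
      · simp [hpw] at h
        rcases List.mem_cons.1 hk with rfl | hk'
        · exact pv_altWord_mono word sr sc dr dc ks _ _ h _ _ (by rw [hg, hpw])
        · exact ih _ _ h _ hk'
      · simp [hpw] at h

theorem pv_altWord_agree (word : String) (sr sc dr dc : Int) :
    ∀ (ks : List Int) (occ occ' : PySem.Dict (Int × Int) String),
      pvAltWord word sr sc dr dc ks occ = some occ' →
      ∀ k ∈ ks, ∀ w, occ.get? (sr + dr * k, sc + dc * k) = some w → w = word := by
  intro ks
  induction ks with
  | nil => intro occ occ' h k hk; simp at hk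
  | cons k0 ks ih =>
    intro occ occ' h k hk w hw
    simp only [pvAltWord] at h
    rcases hg : occ.get? (sr + dr * k0, sc + dc * k0) with _ | prev
    · rw [hg] at h
      rcases List.mem_cons.1 hk with rfl | hk'
      · rw [hg] at hw; exact absurd hw (by simp)
      · by_cases hc : (sr + dr * k, sc + dc * k) = (sr + dr * k0, sc + dc * k0)
        · rw [hc, hg] at hw; exact absurd hw (by simp)
        · refine ih _ _ h _ hk' w ?_
          rw [PySem.Dict.get?_insert, if_neg hc]; exact hw
    · rw [hg] at h
      by_cases hpw : prev = word
      · simp [hpw] at h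
        rcases List.mem_cons.1 hk with rfl | hk'
        · rw [hg] at hw; injection hw with hw'; rw [← hw', hpw]
        · exact ih _ _ h _ hk' w hw
      · simp [hpw] at h

theorem pv_altWord_none (word : String) (sr sc dr dc : Int) :
    ∀ (ks : List Int) (occ : PySem.Dict (Int × Int) String),
      pvAltWord word sr sc dr dc ks occ = none →
      ∃ k ∈ ks, ∃ w, occ.get? (sr + dr * k, sc + dc * k) = some w ∧ w ≠ word := by
  intro ks
  induction ks with
  | nil => intro occ h; simp [pvAltWord] at h
  | cons k0 ks ih =>
    intro occ h
    simp only [pvAltWord] at h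
    rcases hg : occ.get? (sr + dr * k0, sc + dc * k0) with _ | prev
    · rw [hg] at h
      rcases ih _ h with ⟨k, hk, w, hw, hne⟩
      rw [PySem.Dict.get?_insert] at hw
      by_cases hc : (sr + dr * k, sc + dc * k) = (sr + dr * k0, sc + dc * k0)
      · rw [if_pos hc] at hw; injection hw with hw'; exact absurd hw'.symm hne
      · rw [if_neg hc] at hw
        exact ⟨k, List.mem_cons_of_mem _ hk, w, hw, hne⟩
    · rw [hg] at h
      by_cases hpw : prev = word
      · simp [hpw] at h
        rcases ih _ h with ⟨k, hk, w, hw, hne⟩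
        exact ⟨k, List.mem_cons_of_mem _ hk, w, hw, hne⟩
      · exact ⟨k0, List.mem_cons_self, prev, hg, hpw⟩

theorem pv_go_true :
    ∀ (L : List (String × Int × Int × String)) (occ : PySem.Dict (Int × Int) String)
      (P : List (String × Int × Int × String)),
      (∀ c w, occ.get? c = some w → ∃ e ∈ P, e.1 = w ∧ pvCovers e c) →
      pvAltGo L occ = true → pvConflict (P ++ L) := by
  intro L
  induction L with
  | nil => intro occ P _ h; simp [pvAltGo] at h
  | cons e rest ih =>
    intro occ P hP h
    simp only [pvAltGo] at h
    rcases hw : pvAltWord e.1 e.2.1 e.2.2.1 (pvDirOf e.2.2.2).1 (pvDirOf e.2.2.2).2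
        (PySem.List.pyRange 0 (PySem.Str.len e.1) 1) occ with _ | occ'
    · rcases pv_altWord_none _ _ _ _ _ _ _ hw with ⟨k, hk, w, hget, hne⟩
      rcases hP _ _ hget with ⟨e', he'P, he'w, he'c⟩
      rcases PySem.List.mem_pyRange_one.1 hk with ⟨hk0, hklt⟩
      refine ⟨e', List.mem_append_left _ he'P, e, List.mem_append_right _ List.mem_cons_self,
        by rw [he'w]; exact hne, (e.2.1 + (pvDirOf e.2.2.2).1 * k, e.2.2.1 + (pvDirOf e.2.2.2).2 * k), he'c, k, hk0, ?_, rfl⟩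
      simpa [PySem.Str.len] using hklt
    · rw [hw] at h
      have hmain := ih occ' (P ++ [e]) ?_ h
      · rwa [List.append_assoc, List.singleton_append] at hmain
      · intro c w hget
        rcases pv_altWord_get? _ _ _ _ _ _ _ _ hw c with h1 | ⟨_, h2, k, hk, hc⟩
        · rw [h1] at hget
          rcases hP _ _ hget with ⟨e', he'P, he'w, he'c⟩
          exact ⟨e', List.mem_append_left _ he'P, he'w, he'c⟩
        · rw [h2] at hget
          injection hget with hget'
          rcases PySem.List.mem_pyRange_one.1 hk with ⟨hk0, hklt⟩
          refine ⟨e, List.mem_append_right _ List.mem_cons_self, hget', k, hk0, ?_, hc⟩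
          simpa [PySem.Str.len] using hklt

theorem pv_go_false :
    ∀ (L : List (String × Int × Int × String)) (occ : PySem.Dict (Int × Int) String),
      pvAltGo L occ = false →
      (∀ e ∈ L, ∀ c, pvCovers e c → ∀ w, occ.get? c = some w → w = e.1) ∧ ¬ pvConflict L := by
  intro L
  induction L with
  | nil =>
    intro occ _
    exact ⟨by intro e he; simp at he, by rintro ⟨e1, he1, _⟩; simp at he1⟩
  | cons e rest ih =>
    intro occ h
    simp only [pvAltGo] at h
    rcases hw : pvAltWord e.1 e.2.1 e.2.2.1 (pvDirOf e.2.2.2).1 (pvDirOf e.2.2.2).2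
        (PySem.List.pyRange 0 (PySem.Str.len e.1) 1) occ with _ | occ'
    · rw [hw] at h; simp at h
    · rw [hw] at h
      rcases ih occ' h with ⟨F1, F2⟩
      have hmemk : ∀ (k : Int), 0 ≤ k → k < (e.1.toList.length : Int) →
          k ∈ PySem.List.pyRange 0 (PySem.Str.len e.1) 1 := by
        intro k h0 hl
        exact PySem.List.mem_pyRange_one.2 ⟨h0, by simpa [PySem.Str.len] using hl⟩
      have hcov : ∀ c, pvCovers e c → occ'.get? c = some e.1 := by
        rintro c ⟨k, h0, hl, rfl⟩
        exact pv_altWord_covered _ _ _ _ _ _ _ _ hw k (hmemk k h0 hl)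
      constructor
      · intro e' he' c hc w hget
        rcases List.mem_cons.1 he' with rfl | he'rest
        · rcases hc with ⟨k, h0, hl, rfl⟩
          exact pv_altWord_agree _ _ _ _ _ _ _ _ hw k (hmemk k h0 hl) w hget
        · exact F1 e' he'rest c hc w (pv_altWord_mono _ _ _ _ _ _ _ _ hw c w hget)
      · rintro ⟨e1, he1, e2, he2, hne, c, hc1, hc2⟩
        rcases List.mem_cons.1 he1 with rfl | he1r
        · rcases List.mem_cons.1 he2 with rfl | he2r
          · exact hne rfl
          · exact hne (F1 e2 he2r c hc2 e1.1 (hcov c hc1))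
        · rcases List.mem_cons.1 he2 with rfl | he2r
          · exact hne (F1 e1 he1r c hc1 e2.1 (hcov c hc2)).symm
          · exact F2 ⟨e1, he1r, e2, he2r, hne, c, hc1, hc2⟩

theorem pv_B_iff (words : List String) (rows cols : Int) (L : List (String × Int × Int × String)) :
    has_shared_cell_py_alt words rows cols L = true ↔ pvConflict L := by
  simp only [has_shared_cell_py_alt]
  constructor
  · intro h
    have := pv_go_true L PySem.Dict.empty []
      (by intro c w hw; rw [PySem.Dict.get?_empty] at hw; exact absurd hw (by simp)) h
    simpa using this
  · intro hc
    by_contra hne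
    have hfalse : pvAltGo L PySem.Dict.empty = false := by
      cases hb : pvAltGo L PySem.Dict.empty
      · rfl
      · exact absurd hb hne
    exact (pv_go_false L PySem.Dict.empty hfalse).2 hc

-- ===== VERDICT (by name: the statement is the Claim_ definition above) =====
theorem has_shared_cell_py_spec : Claim_equal_has_shared_cell_py := by
  intro words rows cols placement _ _
  unfold Spec_has_shared_cell_py
  rcases hB : has_shared_cell_py_alt words rows cols placement
  · rcases hA : has_shared_cell_py words rows cols placement
    · rfl
    · exact absurd ((pv_B_iff words rows cols placement).2 ((pv_A_iff words rows cols placement).1 hA)) (by simp [hB])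
  · exact (pv_A_iff words rows cols placement).2 ((pv_B_iff words rows cols placement).1 hB)
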